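-- pv_equiv track=rewrite | github.com/sunblinked/estructuras-de-datos-p03-202610-semana5-recursividad-Estructura_202610 | Semana5/ejercicio1.py | contar_recursivo
-- ===== SOURCE A (Python) =====
-- def contar_recursivo(n):
--     lista = []
--     if n > 0:
--         lista = contar_recursivo(n-1)
--         lista.append(n)
--         return lista
--     else:
--         return []
-- ===== SOURCE B (Python) =====
-- def contar_recursivo(n):
--     lista = []
--     i = 1
--     while i <= n:
--         lista.append(i)
--         i += 1
--     return lista
-- ===== Notes on version B (the rewrite author's own statement) =====
-- stated objective: simpler
-- what changed: Replaces the recursive accumulation (recurse on n-1, then append n) with an iterative while loop that appends 1..n into a list, avoiding recursion depth limits.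
import Mathlib
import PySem

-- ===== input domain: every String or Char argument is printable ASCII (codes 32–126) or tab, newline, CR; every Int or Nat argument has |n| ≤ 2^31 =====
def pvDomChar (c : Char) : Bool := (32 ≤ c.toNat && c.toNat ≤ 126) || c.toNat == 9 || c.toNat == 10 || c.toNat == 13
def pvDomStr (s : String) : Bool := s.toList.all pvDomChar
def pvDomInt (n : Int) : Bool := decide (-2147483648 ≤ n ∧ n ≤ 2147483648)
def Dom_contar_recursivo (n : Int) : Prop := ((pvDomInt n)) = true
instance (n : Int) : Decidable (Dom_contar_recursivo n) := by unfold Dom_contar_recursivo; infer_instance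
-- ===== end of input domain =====

-- B replaces A's recursion (recurse on n-1, then append n) with an iterative while loop; objective: simpler.

-- ===== PORT A =====
-- literal port of the recursion: if n > 0, recurse on n-1 and append n, else []
def contar_recursivo (n : Int) : List Int :=
  if n > 0 then contar_recursivo (n - 1) ++ [n] else []
termination_by n.toNat
decreasing_by omega

-- ===== PORT B =====
-- the while loop: state (i, lista); loop while i ≤ n, appending i and incrementing
def contarLoop (n i : Int) (lista : List Int) : List Int :=
  if i ≤ n then contarLoop n (i + 1) (lista ++ [i]) else lista
termination_by (n + 1 - i).toNat
decreasing_by omega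

def contar_recursivo_alt (n : Int) : List Int :=
  contarLoop n 1 []

-- ===== PRECONDITION & SPEC =====
-- Pre_ excludes large n, on which the Python A raises RecursionError (recursion depth ~ n exceeds
-- the interpreter's recursion limit); the bound leaves a small margin since the exact failing depth
-- depends on the interpreter's current stack.
def Pre_contar_recursivo (n : Int) : Prop := n ≤ 9900
instance (n : Int) : Decidable (Pre_contar_recursivo n) := by unfold Pre_contar_recursivo; infer_instance
def pvWitness_contar_recursivo : Int := (5)


def Spec_contar_recursivo (n : Int) (out : List Int) : Prop := out = contar_recursivo_alt n
instance (n : Int) (out : List Int) : Decidable (Spec_contar_recursivo n out) := by unfold Spec_contar_recursivo; infer_instance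

-- ===== CLAIM (what is proved, stated in full; the proofs are below) =====
def Claim_equal_contar_recursivo : Prop := ∀ (n : Int), Dom_contar_recursivo n → Pre_contar_recursivo n → Spec_contar_recursivo n (contar_recursivo n)

-- ===== LEMMAS AND PROOFS =====

theorem contarLoop_closed (m : Nat) (n i : Int) (acc : List Int)
    (h : (n + 1 - i).toNat = m) :
    contarLoop n i acc = acc ++ (List.range m).map (fun k : Nat => i + (k : Int)) := by
  induction m generalizing i acc with
  | zero =>
    rw [contarLoop]
    have : ¬ i ≤ n := by omega
    simp [this]
  | succ m ih =>
    rw [contarLoop]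
    have hle : i ≤ n := by omega
    simp only [if_pos hle]
    rw [ih (i + 1) (acc ++ [i]) (by omega)]
    rw [List.range_succ_eq_map, List.map_cons, List.map_map, List.append_assoc]
    congr 1
    rw [List.singleton_append]
    congr 1
    · omega
    · apply List.map_congr_left
      intro k _
      simp [Function.comp]
      ring

theorem contarA_closed (n : Int) :
    contar_recursivo n = (List.range n.toNat).map (fun k : Nat => 1 + (k : Int)) := by
  by_cases h : n > 0
  · rw [contar_recursivo, if_pos h, contarA_closed (n - 1)]
    have h1 : n.toNat = (n - 1).toNat + 1 := by omega
    rw [h1, List.range_succ, List.map_append, List.map_singleton]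
    congr 2
    omega
  · rw [contar_recursivo, if_neg h]
    have : n.toNat = 0 := by omega
    simp [this]
termination_by n.toNat
decreasing_by omega

-- ===== VERDICT (by name: the statement is the Claim_ definition above) =====
theorem contar_recursivo_spec : Claim_equal_contar_recursivo := by
  intro n _ _
  unfold Spec_contar_recursivo contar_recursivo_alt
  rw [contarA_closed n, contarLoop_closed n.toNat n 1 [] (by omega)]
  simp
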